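-- pv_equiv track=rewrite | github.com/Yuchen-byte/Streamlens | extractor.py | _find_best_subtitle
-- ===== SOURCE A (Python) =====
-- class ExtractionError(Exception):
--     """General extraction failure."""
--
-- def _find_best_subtitle(info: dict, lang: str) -> tuple[str, str, bool]:
--     """Find the best subtitle data for the requested language.
--
--     Returns (subtitle_data, actual_lang, is_auto_generated).
--     Fallback chain: manual subs (exact lang) -> auto captions (exact lang)
--                     -> manual subs (any) -> auto captions (any)
--     Raises ExtractionError if no subtitles found.
--     """
--     manual_subs = info.get("subtitles") or {}
--     auto_subs = info.get("automatic_captions") or {}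
--
--     # Try exact language match first
--     for source, is_auto in [(manual_subs, False), (auto_subs, True)]:
--         for key in (lang, f"{lang}-orig"):
--             entries = source.get(key, [])
--             for entry in entries:
--                 data = entry.get("data")
--                 if isinstance(data, str) and len(data) > 10:
--                     return data, key.split("-")[0], is_auto
--
--     # Fallback: first available language
--     for source, is_auto in [(manual_subs, False), (auto_subs, True)]:
--         for key, entries in source.items():
--             for entry in entries:
--                 data = entry.get("data")
--                 if isinstance(data, str) and len(data) > 10:
--                     return data, key.split("-")[0], is_auto
--
--     raise ExtractionError("No subtitles available for this video")
-- ===== SOURCE B (Python) =====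
-- class ExtractionError(Exception):
--     """General extraction failure."""
--
-- def _find_best_subtitle(info: dict, lang: str) -> tuple[str, str, bool]:
--     """Single pass over each source: assign every key a numeric priority rank
--     (manual-exact 0/1, auto-exact 2/3, manual-any 4, auto-any 5) and keep a
--     running lowest-ranked usable entry, instead of staged sequential probing."""
--     manual_subs = info.get("subtitles") or {}
--     auto_subs = info.get("automatic_captions") or {}
--     best_rank, best = None, None
--     for src_idx, (source, is_auto) in enumerate([(manual_subs, False), (auto_subs, True)]):
--         for key, entries in source.items():
--             if key == lang:
--                 rank = 2 * src_idx
--             elif key == f"{lang}-orig":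
--                 rank = 2 * src_idx + 1
--             else:
--                 rank = 4 + src_idx
--             if best_rank is not None and best_rank <= rank:
--                 continue
--             for entry in entries:
--                 data = entry.get("data")
--                 if isinstance(data, str) and len(data) > 10:
--                     best_rank, best = rank, (data, key.split("-")[0], is_auto)
--                     break
--     if best is None:
--         raise ExtractionError("No subtitles available for this video")
--     return best
-- ===== Notes on version B (the rewrite author's own statement) =====
-- stated objective: alternative
-- what changed: A's staged probing (exact-key pass over both sources, then a fallback pass over all keys) is replaced by a single pass over each source that assigns every key a numeric priority rank (manual-exact 0/1, auto-exact 2/3, manual-any 4, auto-any 5) and keeps a running minimum-rank best entry.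
import Mathlib
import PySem

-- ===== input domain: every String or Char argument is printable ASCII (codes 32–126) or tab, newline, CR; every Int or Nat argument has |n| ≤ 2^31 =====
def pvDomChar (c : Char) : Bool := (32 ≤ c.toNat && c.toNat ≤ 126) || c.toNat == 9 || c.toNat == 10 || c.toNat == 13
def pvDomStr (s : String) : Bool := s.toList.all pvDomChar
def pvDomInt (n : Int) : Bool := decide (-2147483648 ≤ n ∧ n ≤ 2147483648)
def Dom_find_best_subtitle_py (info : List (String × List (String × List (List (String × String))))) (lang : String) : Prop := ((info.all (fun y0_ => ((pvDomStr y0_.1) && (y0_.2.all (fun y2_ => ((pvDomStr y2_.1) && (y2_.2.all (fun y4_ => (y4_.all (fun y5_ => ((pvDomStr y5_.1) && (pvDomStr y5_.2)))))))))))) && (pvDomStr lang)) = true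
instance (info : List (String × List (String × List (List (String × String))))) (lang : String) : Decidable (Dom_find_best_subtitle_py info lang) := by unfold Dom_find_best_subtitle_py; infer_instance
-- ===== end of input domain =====

-- B replaces A's staged probing (exact-key pass over both sources, then a fallback pass over all keys) by one pass per source that ranks every key numerically and keeps a running minimum-rank best entry (alternative decomposition, same cost).


-- ===== PORT A =====
-- shared helpers (the inner entry-validation loop, dict .get and key.split("-")[0]
-- are textually identical in A and B, so they are shared helpers of both ports)
def pvLookupD {α : Type} (d : List (String × α)) (k : String) (dflt : α) : α :=
  (List.lookup k d).getD dflt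
def pvGoodData? (entry : List (String × String)) : Option String :=
  match List.lookup "data" entry with
  | some s => if 10 < PySem.Str.len s then some s else none
  | none => none
def pvFirstGood (entries : List (List (String × String))) : Option String :=
  entries.findSome? pvGoodData?
def pvKeyBase (key : String) : String :=
  match PySem.Str.split? key "-" with
  | some ps => ps.headD ""
  | none => ""

-- A: phase 1 probes the exact keys of both sources, phase 2 rescans every key
def find_best_subtitle_py (info : List (String × List (String × List (List (String × String))))) (lang : String) : String × String × Bool :=
  let manual_subs := pvLookupD info "subtitles" []
  let auto_subs := pvLookupD info "automatic_captions" []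
  let exact := [(manual_subs, false), (auto_subs, true)].findSome? (fun si =>
    [lang, lang ++ "-orig"].findSome? (fun key =>
      (pvFirstGood (pvLookupD si.1 key [])).map (fun d => (d, pvKeyBase key, si.2))))
  match exact with
  | some r => r
  | none =>
    match [(manual_subs, false), (auto_subs, true)].findSome? (fun si =>
      si.1.findSome? (fun ke => (pvFirstGood ke.2).map (fun d => (d, pvKeyBase ke.1, si.2)))) with
    | some r => r
    | none => ("", "", false)

-- ===== PORT B =====
-- B's rank of a key: manual-exact 0/1, auto-exact 2/3, manual-any 4, auto-any 5;
-- pvStepB is one iteration of B's single pass: skip the key when the current best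
-- rank is already ≤ its rank, else scan its entries and adopt the first valid one
def pvRank (lang k : String) (i : Nat) : Nat :=
  if k = lang then 2 * i else if k = lang ++ "-orig" then 2 * i + 1 else 4 + i
def pvStepB (lang : String) (i : Nat) (b : Bool)
    (st : Option (Nat × String × String × Bool)) (ke : String × List (List (String × String))) :
    Option (Nat × String × String × Bool) :=
  let rank := pvRank lang ke.1 i
  match st with
  | some s =>
      if s.1 ≤ rank then some s
      else match pvFirstGood ke.2 with
        | some d => some (rank, d, pvKeyBase ke.1, b)
        | none => some s
  | none =>
      match pvFirstGood ke.2 with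
      | some d => some (rank, d, pvKeyBase ke.1, b)
      | none => none
def find_best_subtitle_py_alt (info : List (String × List (String × List (List (String × String))))) (lang : String) : String × String × Bool :=
  let manual_subs := pvLookupD info "subtitles" []
  let auto_subs := pvLookupD info "automatic_captions" []
  let st1 := manual_subs.foldl (pvStepB lang 0 false) none
  let st2 := auto_subs.foldl (pvStepB lang 1 true) st1
  match st2 with
  | some s => s.2
  | none => ("", "", false)

-- ===== PRECONDITION & SPEC =====
-- Pre_ excludes (a) inputs with no valid subtitle entry at all, on which A raises
-- ExtractionError (both ports return a default triple there), and (b) subtitle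
-- sources whose association lists carry duplicate keys: those represent no Python
-- dict (A's parameter is a dict, so duplicate keys cannot occur there), and on
-- them A's .get-first-match vs items-iteration order is accidental.
def Pre_find_best_subtitle_py (info : List (String × List (String × List (List (String × String))))) (lang : String) : Prop :=
  (∃ p ∈ ((List.lookup "subtitles" info).getD [] ++ (List.lookup "automatic_captions" info).getD []),
    ∃ e ∈ p.2, ((List.lookup "data" e).any (fun s => decide (10 < PySem.Str.len s))) = true)
  ∧ (((List.lookup "subtitles" info).getD []).map Prod.fst).Nodup
  ∧ (((List.lookup "automatic_captions" info).getD []).map Prod.fst).Nodup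
instance (info : List (String × List (String × List (List (String × String))))) (lang : String) : Decidable (Pre_find_best_subtitle_py info lang) := by unfold Pre_find_best_subtitle_py; infer_instance

def pvWitness_find_best_subtitle_py : (List (String × List (String × List (List (String × String))))) × String :=
  ([("subtitles", [("en", [[("data", "hello world!")]])])], "en")

def Spec_find_best_subtitle_py (info : List (String × List (String × List (List (String × String))))) (lang : String) (out : String × String × Bool) : Prop := out = find_best_subtitle_py_alt info lang
instance (info : List (String × List (String × List (List (String × String))))) (lang : String) (out : String × String × Bool) : Decidable (Spec_find_best_subtitle_py info lang out) := by unfold Spec_find_best_subtitle_py; infer_instance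

-- ===== CLAIM (what is proved, stated in full; the proofs are below) =====
def Claim_equal_find_best_subtitle_py : Prop := ∀ (info : List (String × List (String × List (List (String × String))))) (lang : String), Dom_find_best_subtitle_py info lang → Pre_find_best_subtitle_py info lang → Spec_find_best_subtitle_py info lang (find_best_subtitle_py info lang)

-- ===== LEMMAS AND PROOFS =====
theorem pvWitness_ok : Dom_find_best_subtitle_py pvWitness_find_best_subtitle_py.1 pvWitness_find_best_subtitle_py.2 ∧ Pre_find_best_subtitle_py pvWitness_find_best_subtitle_py.1 pvWitness_find_best_subtitle_py.2 := by
  decide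

def pvM (x y : Option (Nat × String × String × Bool)) : Option (Nat × String × String × Bool) :=
  match x, y with
  | none, y => y
  | some a, none => some a
  | some a, some c => if a.1 ≤ c.1 then some a else some c
def pvCand (lang : String) (i : Nat) (b : Bool) (ke : String × List (List (String × String))) :
    Option (Nat × String × String × Bool) :=
  (pvFirstGood ke.2).map (fun d => (pvRank lang ke.1 i, d, pvKeyBase ke.1, b))
theorem pvStepB_eq_m (lang : String) (i : Nat) (b : Bool) (st : Option (Nat × String × String × Bool)) (ke : String × List (List (String × String))) :
    pvStepB lang i b st ke = pvM st (pvCand lang i b ke) := by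
  unfold pvStepB pvM pvCand
  cases st <;> cases pvFirstGood ke.2 <;> simp
theorem pvM_assoc (x y z : Option (Nat × String × String × Bool)) :
    pvM (pvM x y) z = pvM x (pvM y z) := by
  cases x with
  | none => rfl
  | some a => cases y with
    | none => rfl
    | some c => cases z with
      | none => simp only [pvM]; split_ifs <;> rfl
      | some e =>
          by_cases h1 : a.1 ≤ c.1 <;> by_cases h2 : c.1 ≤ e.1 <;> by_cases h3 : a.1 ≤ e.1 <;>
            simp [pvM, h1, h2, h3] <;> omega
theorem pvFoldB_start (lang : String) (i : Nat) (b : Bool) (st : Option (Nat × String × String × Bool)) (S : List (String × List (List (String × String)))) :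
    S.foldl (pvStepB lang i b) st = pvM st (S.foldl (pvStepB lang i b) none) := by
  induction S generalizing st with
  | nil => cases st <;> simp [pvM]
  | cons ke S' ih =>
      simp only [List.foldl_cons]
      rw [ih (pvStepB lang i b st ke), ih (pvStepB lang i b none ke),
        pvStepB_eq_m, pvStepB_eq_m, pvM_assoc]
      rfl
theorem pv_lookup_none {α : Type} (k : String) (l : List (String × α)) (h : k ∉ l.map Prod.fst) :
    List.lookup k l = none := by
  induction l with
  | nil => rfl
  | cons a l ih =>
      simp only [List.map_cons, List.mem_cons, not_or] at h
      have hb : (k == a.1) = false := beq_eq_false_iff_ne.mpr h.1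
      simp [List.lookup, hb, ih h.2]
theorem pv_ne_orig (s : String) : s ++ "-orig" ≠ s := by
  intro h
  have := congrArg PySem.Str.len h
  rw [PySem.Str.len_append] at this
  simp [PySem.Str.len] at this
def pvE (S : List (String × List (List (String × String)))) (k : String) : Option String :=
  pvFirstGood (pvLookupD S k [])
def pvFbnx (lang : String) (S : List (String × List (List (String × String)))) : Option (String × String) :=
  S.findSome? (fun ke => if ke.1 = lang ∨ ke.1 = lang ++ "-orig" then none
    else (pvFirstGood ke.2).map (fun d => (ke.1, d)))
def pvTarget (lang : String) (i : Nat) (b : Bool) (S : List (String × List (List (String × String)))) :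
    Option (Nat × String × String × Bool) :=
  match pvE S lang with
  | some d => some (2 * i, d, pvKeyBase lang, b)
  | none =>
    match pvE S (lang ++ "-orig") with
    | some d => some (2 * i + 1, d, pvKeyBase (lang ++ "-orig"), b)
    | none => (pvFbnx lang S).map (fun kd => (4 + i, kd.2, pvKeyBase kd.1, b))

theorem pvLookupD_cons (k : String) (es : List (List (String × String)))
    (S' : List (String × List (List (String × String)))) (key : String) :
    pvLookupD ((k, es) :: S') key [] = if key = k then es else pvLookupD S' key [] := by
  by_cases h : key = k
  · simp [pvLookupD, List.lookup, h]
  · have hb : (key == k) = false := beq_eq_false_iff_ne.mpr h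
    simp [pvLookupD, List.lookup, hb, h]


theorem pvM_none_left (y : Option (Nat × String × String × Bool)) : pvM none y = y := rfl

theorem pvE_cons (k : String) (es : List (List (String × String)))
    (S' : List (String × List (List (String × String)))) (key : String) :
    pvE ((k, es) :: S') key = if key = k then pvFirstGood es else pvE S' key := by
  by_cases h : key = k <;> simp [pvE, pvLookupD_cons, h]

theorem pvFbnx_cons (lang k : String) (es : List (List (String × String)))
    (S' : List (String × List (List (String × String)))) :
    pvFbnx lang ((k, es) :: S') =
      ((if k = lang ∨ k = lang ++ "-orig" then none
        else (pvFirstGood es).map (fun d => (k, d))).or (pvFbnx lang S')) := by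
  simp only [pvFbnx, List.findSome?_cons]
  split_ifs with h <;> cases hfe : pvFirstGood es <;> simp

theorem pvFoldB_char (lang : String) (i : Nat) (b : Bool)
    (S : List (String × List (List (String × String))))
    (hi : i ≤ 1) (hnd : (S.map Prod.fst).Nodup) :
    S.foldl (pvStepB lang i b) none = pvTarget lang i b S := by
  induction S with
  | nil => simp [pvTarget, pvE, pvLookupD, pvFirstGood, pvFbnx]
  | cons ke S' ih =>
      obtain ⟨k, es⟩ := ke
      simp only [List.map_cons, List.nodup_cons] at hnd
      obtain ⟨hk, hnd'⟩ := hnd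
      have ih' := ih hnd'
      simp only [List.foldl_cons]
      rw [pvFoldB_start, pvStepB_eq_m, ih', pvM_none_left]
      by_cases h1 : k = lang
      · subst h1
        have hnone : pvE S' k = none := by
          simp [pvE, pvLookupD, pv_lookup_none k S' hk, pvFirstGood]
        simp only [pvTarget, pvCand, pvRank, pvE_cons, pvFbnx_cons,
          if_neg (pv_ne_orig k), hnone]
        cases hfe : pvFirstGood es <;>
          cases h2 : pvE S' (k ++ "-orig") <;>
            cases h3 : pvFbnx k S' <;>
              simp only [Option.map_none, Option.map_some, pvM] <;>
                (try split_ifs) <;> first | rfl | omega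
      · by_cases h2 : k = lang ++ "-orig"
        · subst h2
          have hnone : pvE S' (lang ++ "-orig") = none := by
            simp [pvE, pvLookupD, pv_lookup_none _ S' hk, pvFirstGood]
          simp only [pvTarget, pvCand, pvRank, pvE_cons, pvFbnx_cons,
            if_neg (pv_ne_orig lang), if_neg (Ne.symm (pv_ne_orig lang)), hnone]
          cases hfe : pvFirstGood es <;>
            cases h3 : pvE S' lang <;>
              cases h4 : pvFbnx lang S' <;>
                simp only [Option.map_none, Option.map_some, pvM] <;>
                  (try split_ifs) <;> first | rfl | omega
        · have hne : ¬ (k = lang ∨ k = lang ++ "-orig") := by tauto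
          simp only [pvTarget, pvCand, pvRank, pvE_cons, pvFbnx_cons,
            if_neg (fun h => h1 (Eq.symm h)), if_neg (fun h => h2 (Eq.symm h)), if_neg hne]
          cases hfe : pvFirstGood es <;>
            cases h3 : pvE S' lang <;>
              cases h4 : pvE S' (lang ++ "-orig") <;>
                cases h5 : pvFbnx lang S' <;>
                  simp only [Option.map_none, Option.map_some, Option.none_or,
                    Option.some_or, pvM] <;>
                    (try split_ifs) <;> first | rfl | omega

theorem pvE_def (S : List (String × List (List (String × String)))) (k : String) :
    pvFirstGood (pvLookupD S k []) = pvE S k := rfl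

theorem pvFb_eq (lang : String) (fl : Bool)
    (S : List (String × List (List (String × String))))
    (hnd : (S.map Prod.fst).Nodup)
    (h1 : pvE S lang = none) (h2 : pvE S (lang ++ "-orig") = none) :
    S.findSome? (fun ke => (pvFirstGood ke.2).map (fun d => (d, pvKeyBase ke.1, fl)))
      = (pvFbnx lang S).map (fun kd => (kd.2, pvKeyBase kd.1, fl)) := by
  induction S with
  | nil => rfl
  | cons ke S' ih =>
      obtain ⟨k, es⟩ := ke
      simp only [List.map_cons, List.nodup_cons] at hnd
      obtain ⟨hk, hnd'⟩ := hnd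
      rw [pvE_cons] at h1 h2
      rw [List.findSome?_cons, pvFbnx_cons]
      by_cases hk1 : k = lang
      · subst hk1
        rw [if_pos rfl] at h1
        rw [if_neg (pv_ne_orig k)] at h2
        have hE1 : pvE S' k = none := by
          simp [pvE, pvLookupD, pv_lookup_none k S' hk, pvFirstGood]
        simp only [h1, Option.map_none, ite_self, Option.none_or]
        exact ih hnd' hE1 h2
      · by_cases hk2 : k = lang ++ "-orig"
        · subst hk2
          rw [if_neg (Ne.symm (pv_ne_orig lang))] at h1
          rw [if_pos rfl] at h2
          have hE2 : pvE S' (lang ++ "-orig") = none := by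
            simp [pvE, pvLookupD, pv_lookup_none _ S' hk, pvFirstGood]
          simp only [h2, Option.map_none, ite_self, Option.none_or]
          exact ih hnd' h1 hE2
        · rw [if_neg (fun h => hk1 (Eq.symm h))] at h1
          rw [if_neg (fun h => hk2 (Eq.symm h))] at h2
          rw [if_neg (fun h => h.elim hk1 hk2)]
          cases hfe : pvFirstGood es with
          | some d => simp
          | none => simp only [Option.map_none, Option.none_or]; exact ih hnd' h1 h2

theorem pv_main (info : List (String × List (String × List (List (String × String))))) (lang : String)
    (hnd0 : ((pvLookupD info "subtitles" []).map Prod.fst).Nodup)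
    (hnd1 : ((pvLookupD info "automatic_captions" []).map Prod.fst).Nodup) :
    find_best_subtitle_py info lang = find_best_subtitle_py_alt info lang := by
  simp only [find_best_subtitle_py, find_best_subtitle_py_alt]
  rw [pvFoldB_start lang 1 true, pvFoldB_char lang 0 false _ (by omega) hnd0,
    pvFoldB_char lang 1 true _ (by omega) hnd1]
  simp only [List.findSome?_cons, List.findSome?_nil]
  rw [pvE_def, pvE_def, pvE_def, pvE_def]
  cases h0 : pvE (pvLookupD info "subtitles" []) lang with
  | some d =>
      simp only [pvTarget, h0, Option.map_some]
      cases pvE (pvLookupD info "automatic_captions" []) lang <;>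
        cases pvE (pvLookupD info "automatic_captions" []) (lang ++ "-orig") <;>
          cases pvFbnx lang (pvLookupD info "automatic_captions" []) <;> simp [pvM]
  | none =>
  cases h1 : pvE (pvLookupD info "subtitles" []) (lang ++ "-orig") with
  | some d =>
      simp only [pvTarget, h0, h1, Option.map_none, Option.map_some]
      cases pvE (pvLookupD info "automatic_captions" []) lang <;>
        cases pvE (pvLookupD info "automatic_captions" []) (lang ++ "-orig") <;>
          cases pvFbnx lang (pvLookupD info "automatic_captions" []) <;> simp [pvM]
  | none =>
  cases h2 : pvE (pvLookupD info "automatic_captions" []) lang with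
  | some d =>
      simp only [pvTarget, h0, h1, h2, Option.map_none, Option.map_some]
      cases pvFbnx lang (pvLookupD info "subtitles" []) <;> simp [pvM]
  | none =>
  cases h3 : pvE (pvLookupD info "automatic_captions" []) (lang ++ "-orig") with
  | some d =>
      simp only [pvTarget, h0, h1, h2, h3, Option.map_none, Option.map_some]
      cases pvFbnx lang (pvLookupD info "subtitles" []) <;> simp [pvM]
  | none =>
      rw [pvFb_eq lang false _ hnd0 h0 h1, pvFb_eq lang true _ hnd1 h2 h3]
      simp only [pvTarget, h0, h1, h2, h3, Option.map_none]
      cases h4 : pvFbnx lang (pvLookupD info "subtitles" []) <;>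
        cases h5 : pvFbnx lang (pvLookupD info "automatic_captions" []) <;>
          simp [pvM]

-- ===== VERDICT (by name: the statement is the Claim_ definition above) =====
theorem find_best_subtitle_py_spec : Claim_equal_find_best_subtitle_py := by
  intro info lang _ hpre
  unfold Spec_find_best_subtitle_py
  exact pv_main info lang hpre.2.1 hpre.2.2
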